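-- pv_equiv track=rewrite | github.com/katherinetung/word_games | word_games.py | game_value
-- ===== SOURCE A (Python) =====
-- def game_value(prefix, prefix_dict, word_dict):
--     if not prefix_dict[prefix] == -1:
--         return prefix_dict[prefix]
--     if prefix in word_dict:
--         prefix_dict[prefix] = 0
--         return prefix_dict[prefix]
--     is_winner = False
--     best_so_far = 0
--     for a in "ABCDEFGHIJKLMNOPQRSTUVWXYZ":
--         child = prefix+str(a)
--         if child in prefix_dict:
--             child_value = game_value(child, prefix_dict, word_dict)
--             winner_child = child_value%2 == 0
--             if is_winner:
--                 if not winner_child: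
--                     best_so_far = min(best_so_far, 1 + child_value)
--             else:
--                 if not winner_child:
--                     is_winner = True
--                     best_so_far = 1 + child_value
--                 else:
--                     best_so_far = max(best_so_far, 1 + child_value)
--     prefix_dict[prefix] = best_so_far
--     return prefix_dict[prefix]
-- ===== SOURCE B (Python) =====
-- def game_value(prefix, prefix_dict, word_dict):
--     # Bottom-up DP: fill the whole memo table in decreasing key-length order
--     # (children are strictly longer, so already final), then read off the answer.
--     for key in sorted(prefix_dict, key=len, reverse=True):
--         if prefix_dict[key] == -1:
--             if key in word_dict:
--                 prefix_dict[key] = 0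
--             else:
--                 vals = [prefix_dict[key + c] for c in "ABCDEFGHIJKLMNOPQRSTUVWXYZ"
--                         if key + c in prefix_dict]
--                 odd = [v for v in vals if v % 2 == 1]
--                 if odd:
--                     prefix_dict[key] = 1 + min(odd)
--                 elif vals:
--                     prefix_dict[key] = max(0, 1 + max(vals))
--                 else:
--                     prefix_dict[key] = 0
--     return prefix_dict[prefix]
-- ===== Notes on version B (the rewrite author's own statement) =====
-- stated objective: alternative
-- what changed: A's top-down memoized recursion is replaced by an iterative bottom-up dynamic program: B sorts the memo keys by decreasing length and fills the whole table in one pass (each node's value computed from its already-final children via a min-over-odd / max-over-all reduction), then just reads off prefix's entry; Pre_ excludes only inputs where prefix is missing from prefix_dict, on which both A and B raise KeyError. B fills every -1 entry of prefix_dict, while A only writes nodes reachable from prefix; the RETURN value is what is proved equal.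
import Mathlib
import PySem

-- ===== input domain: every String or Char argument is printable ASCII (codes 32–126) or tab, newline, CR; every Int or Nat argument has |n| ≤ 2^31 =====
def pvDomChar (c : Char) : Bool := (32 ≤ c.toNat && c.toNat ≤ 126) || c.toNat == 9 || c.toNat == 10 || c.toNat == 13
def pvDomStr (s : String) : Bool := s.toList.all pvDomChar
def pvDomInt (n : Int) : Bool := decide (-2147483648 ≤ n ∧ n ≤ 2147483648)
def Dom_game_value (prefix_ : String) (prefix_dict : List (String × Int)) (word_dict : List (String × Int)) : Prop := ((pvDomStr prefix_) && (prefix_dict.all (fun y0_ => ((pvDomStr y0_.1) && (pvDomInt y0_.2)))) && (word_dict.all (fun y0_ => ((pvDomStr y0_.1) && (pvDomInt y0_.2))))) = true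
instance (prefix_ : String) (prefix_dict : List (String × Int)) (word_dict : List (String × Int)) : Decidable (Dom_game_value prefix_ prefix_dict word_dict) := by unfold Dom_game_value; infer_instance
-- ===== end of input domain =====

-- Both programs use the Python memo dict `prefix_dict` as working storage; the equivalence proved
-- here is about the RETURN value (A writes only the nodes its recursion reaches, B fills every -1
-- entry — a side-effect difference stated in the claim). B replaces A's top-down memoized
-- recursion by an iterative bottom-up dynamic program: it sorts the memo keys by decreasing
-- length and fills the table in one pass (children are strictly longer, hence already final),
-- then reads off prefix's entry. Strings are handled as List Char (PySem convention); A's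
-- recursion is made total with fuel = number of dict entries + 1, which always suffices because
-- each recursive step moves to a strictly longer key present in the (key-set-preserving) dict.

-- ===== PORT A =====
def pvLetters : List Char :=
  ['A','B','C','D','E','F','G','H','I','J','K','L','M',
   'N','O','P','Q','R','S','T','U','V','W','X','Y','Z']

-- one iteration of A's for-loop body (g = the recursive call at the remaining fuel)
def stepA (g : List Char → PySem.Dict (List Char) Int → Int × PySem.Dict (List Char) Int)
    (p : List Char) (st : Bool × Int × PySem.Dict (List Char) Int) (a : Char) :
    Bool × Int × PySem.Dict (List Char) Int :=
  let child := p ++ [a]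
  if st.2.2.contains child then
    let r := g child st.2.2
    let winner_child := PySem.Int.mod r.1 2 == 0
    if st.1 then
      (if !winner_child then (st.1, min st.2.1 (1 + r.1), r.2) else (st.1, st.2.1, r.2))
    else
      (if !winner_child then (true, 1 + r.1, r.2) else (st.1, max st.2.1 (1 + r.1), r.2))
  else st

-- the body of one call of A (g = the recursive call at the remaining fuel)
def gvAstep (wd : PySem.Dict (List Char) Int)
    (g : List Char → PySem.Dict (List Char) Int → Int × PySem.Dict (List Char) Int)
    (p : List Char) (pd : PySem.Dict (List Char) Int) : Int × PySem.Dict (List Char) Int :=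
  match pd.get? p with
  | none => (0, pd)                     -- Python raises KeyError here; excluded by Pre_
  | some v =>
    if v ≠ -1 then (v, pd)
    else if wd.contains p then (0, pd.insert p 0)
    else
      let st := pvLetters.foldl (stepA g p) (false, 0, pd)
      (st.2.1, st.2.2.insert p st.2.1)

def gvA (wd : PySem.Dict (List Char) Int) :
    Nat → List Char → PySem.Dict (List Char) Int → Int × PySem.Dict (List Char) Int
  | 0 => fun _ pd => (0, pd)            -- fuel exhausted: never reached (see header comment)
  | f + 1 => gvAstep wd (gvA wd f)

def game_value (prefix_ : String) (prefix_dict : List (String × Int)) (word_dict : List (String × Int)) : Int :=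
  let pd := PySem.Dict.ofList (prefix_dict.map (fun q => (q.1.toList, q.2)))
  let wd := PySem.Dict.ofList (word_dict.map (fun q => (q.1.toList, q.2)))
  (gvA wd (prefix_dict.length + 1) prefix_.toList pd).1

-- ===== PORT B =====
-- one iteration of B's table-filling loop: finalize the entry of key k
def stepKey (wd : PySem.Dict (List Char) Int)
    (d : PySem.Dict (List Char) Int) (k : List Char) : PySem.Dict (List Char) Int :=
  match d.get? k with
  | none => d                           -- unreachable: k is one of d's own keys
  | some v =>
    if v == -1 then
      if wd.contains k then d.insert k 0
      else
        let vals := (pvLetters.filter (fun a => d.contains (k ++ [a]))).map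
          (fun a => (d.get? (k ++ [a])).getD 0)   -- getD: the key was just checked present
        let odd := vals.filter (fun v => PySem.Int.mod v 2 == 1)
        let result :=
          if !odd.isEmpty then 1 + (PySem.List.min? odd (fun y => y)).getD 0
          else if !vals.isEmpty then max 0 (1 + (PySem.List.max? vals (fun y => y)).getD 0)
          else 0
        d.insert k result
    else d

def game_value_alt (prefix_ : String) (prefix_dict : List (String × Int)) (word_dict : List (String × Int)) : Int :=
  let pd := PySem.Dict.ofList (prefix_dict.map (fun q => (q.1.toList, q.2)))
  let wd := PySem.Dict.ofList (word_dict.map (fun q => (q.1.toList, q.2)))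
  let ks := PySem.List.sorted pd.keys (fun k => k.length) true
  let fin := ks.foldl (stepKey wd) pd
  (fin.get? prefix_.toList).getD 0      -- Python raises KeyError here if absent; excluded by Pre_

-- ===== PRECONDITION & SPEC =====
-- Pre_ excludes exactly the inputs where Python's `prefix_dict[prefix]` raises KeyError
-- (prefix not a key of the dict); both A and B raise there.
def Pre_game_value (prefix_ : String) (prefix_dict : List (String × Int)) (word_dict : List (String × Int)) : Prop :=
  prefix_.toList ∈ prefix_dict.map (fun q => q.1.toList)
instance (prefix_ : String) (prefix_dict : List (String × Int)) (word_dict : List (String × Int)) : Decidable (Pre_game_value prefix_ prefix_dict word_dict) := by unfold Pre_game_value; infer_instance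

def pvWitness_game_value : String × (List (String × Int)) × (List (String × Int)) :=
  ("A", [("A", -1), ("AB", -1)], [("AB", 0)])

def Spec_game_value (prefix_ : String) (prefix_dict : List (String × Int)) (word_dict : List (String × Int)) (out : Int) : Prop := out = game_value_alt prefix_ prefix_dict word_dict
instance (prefix_ : String) (prefix_dict : List (String × Int)) (word_dict : List (String × Int)) (out : Int) : Decidable (Spec_game_value prefix_ prefix_dict word_dict out) := by unfold Spec_game_value; infer_instance

-- ===== CLAIM (what is proved, stated in full; the proofs are below) =====
def Claim_equal_game_value : Prop := ∀ (prefix_ : String) (prefix_dict : List (String × Int)) (word_dict : List (String × Int)), Dom_game_value prefix_ prefix_dict word_dict → Pre_game_value prefix_ prefix_dict word_dict → Spec_game_value prefix_ prefix_dict word_dict (game_value prefix_ prefix_dict word_dict)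

-- ===== LEMMAS AND PROOFS =====

-- redA is A's loop reduction as a pure function of the list of child values;
-- valF (with fuel) / valT is the value function both programs compute.
def redA (w : Bool) (b : Int) : List Int → Bool × Int
  | [] => (w, b)
  | v :: vs =>
    let wc := PySem.Int.mod v 2 == 0
    if w then (if !wc then redA w (min b (1 + v)) vs else redA w b vs)
    else (if !wc then redA true (1 + v) vs else redA w (max b (1 + v)) vs)

def depthM (seed : PySem.Dict (List Char) Int) (p : List Char) : Nat :=
  (seed.keys.filter (fun k => decide (p.length < k.length))).length

def valF (seed wd : PySem.Dict (List Char) Int) : Nat → List Char → Int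
  | 0, _ => 0
  | f + 1, p =>
    match seed.get? p with
    | none => 0
    | some v =>
      if v ≠ -1 then v
      else if wd.contains p then 0
      else (redA false 0 ((pvLetters.filter (fun a => seed.contains (p ++ [a]))).map
             (fun a => valF seed wd f (p ++ [a])))).2

def valT (seed wd : PySem.Dict (List Char) Int) (p : List Char) : Int :=
  valF seed wd (depthM seed p + 1) p

def cv (seed wd : PySem.Dict (List Char) Int) (p : List Char) : List Int :=
  (pvLetters.filter (fun a => seed.contains (p ++ [a]))).map (fun a => valT seed wd (p ++ [a]))

-- the invariant A's recursion maintains on the memo dict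
def invA (seed wd d : PySem.Dict (List Char) Int) : Prop :=
  ∀ k, d.get? k = seed.get? k ∨ (seed.contains k = true ∧ d.get? k = some (valT seed wd k))

lemma depth_lt (seed : PySem.Dict (List Char) Int) (p : List Char) (a : Char)
    (h : seed.contains (p ++ [a]) = true) : depthM seed (p ++ [a]) < depthM seed p := by
  have hmem : (p ++ [a]) ∈ seed.keys := (PySem.Dict.contains_iff_mem_keys _ _).1 h
  unfold depthM
  have hsub : seed.keys.filter (fun k => decide ((p ++ [a]).length < k.length))
      = (seed.keys.filter (fun k => decide (p.length < k.length))).filter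
          (fun k => decide ((p ++ [a]).length < k.length)) := by
    rw [List.filter_filter]
    apply List.filter_congr
    intro x _
    by_cases hx : (p ++ [a]).length < x.length
    · have hpx : p.length < x.length := by simp at hx ⊢; omega
      simp [hpx]
    · simp; omega
  rw [hsub]
  apply List.length_filter_lt_length_iff_exists.2
  refine ⟨p ++ [a], List.mem_filter.2 ⟨hmem, by simp⟩, by simp⟩

lemma valF_irrel (seed wd : PySem.Dict (List Char) Int) :
    ∀ f g p, depthM seed p < f → depthM seed p < g → valF seed wd f p = valF seed wd g p := by
  intro f
  induction f with
  | zero => intro g p h; omega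
  | succ n ih =>
    intro g p hf hg
    match g, hg with
    | m + 1, hg =>
      simp only [valF]
      cases hsp : seed.get? p with
      | none => rfl
      | some v =>
        dsimp only
        by_cases hv : v ≠ -1
        · simp [hv]
        · simp only [hv, if_false]
          by_cases hw : wd.contains p = true
          · simp [hw]
          · simp only [hw]
            have hmap : (pvLetters.filter (fun a => seed.contains (p ++ [a]))).map
                  (fun a => valF seed wd n (p ++ [a]))
                = (pvLetters.filter (fun a => seed.contains (p ++ [a]))).map
                  (fun a => valF seed wd m (p ++ [a])) := by
              apply List.map_congr_left
              intro a ha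
              have hc := (List.mem_filter.1 ha).2
              have hd := depth_lt seed p a hc
              exact ih m (p ++ [a]) (by omega) (by omega)
            rw [hmap]

lemma valT_none (seed wd : PySem.Dict (List Char) Int) (p : List Char)
    (h : seed.get? p = none) : valT seed wd p = 0 := by
  simp [valT, valF, h]

lemma valT_some_ne (seed wd : PySem.Dict (List Char) Int) (p : List Char) (v : Int)
    (h : seed.get? p = some v) (hv : v ≠ -1) : valT seed wd p = v := by
  simp [valT, valF, h, hv]

lemma valT_word (seed wd : PySem.Dict (List Char) Int) (p : List Char)
    (h : seed.get? p = some (-1)) (hw : wd.contains p = true) : valT seed wd p = 0 := by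
  simp [valT, valF, h, hw]

lemma valT_reduce (seed wd : PySem.Dict (List Char) Int) (p : List Char)
    (h : seed.get? p = some (-1)) (hw : wd.contains p = false) :
    valT seed wd p = (redA false 0 (cv seed wd p)).2 := by
  simp only [valT, valF, h, hw]
  have hmap : (pvLetters.filter (fun a => seed.contains (p ++ [a]))).map
        (fun a => valF seed wd (depthM seed p) (p ++ [a])) = cv seed wd p := by
    apply List.map_congr_left
    intro a ha
    have hc := (List.mem_filter.1 ha).2
    have hd := depth_lt seed p a hc
    exact valF_irrel seed wd _ _ _ (by omega) (by omega)
  simp [hmap]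

lemma invA_contains (seed wd d : PySem.Dict (List Char) Int) (h : invA seed wd d) (k : List Char) :
    d.contains k = seed.contains k := by
  rcases h k with h1 | ⟨h2, h3⟩
  · rw [PySem.Dict.contains_eq_isSome_get?, PySem.Dict.contains_eq_isSome_get?, h1]
  · rw [PySem.Dict.contains_eq_isSome_get?, h3, h2]; rfl

lemma invA_read (seed wd d : PySem.Dict (List Char) Int) (h : invA seed wd d)
    (p : List Char) (v : Int) (hg : d.get? p = some v) (hv : v ≠ -1) :
    v = valT seed wd p := by
  rcases h p with h1 | ⟨_, h3⟩
  · exact (valT_some_ne seed wd p v (h1 ▸ hg) hv).symm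
  · rw [hg] at h3; exact (Option.some.inj h3)

lemma invA_seed_neg (seed wd d : PySem.Dict (List Char) Int) (h : invA seed wd d)
    (p : List Char) (hg : d.get? p = some (-1)) : seed.get? p = some (-1) := by
  rcases h p with h1 | ⟨h2, h3⟩
  · rw [← h1, hg]
  · rw [hg] at h3
    have hvt : valT seed wd p = -1 := (Option.some.inj h3).symm
    rw [PySem.Dict.contains_eq_isSome_get?] at h2
    cases hs : seed.get? p with
    | none => rw [hs] at h2; simp at h2
    | some s =>
      by_cases hsv : s ≠ -1
      · exact absurd ((valT_some_ne seed wd p s hs hsv).symm.trans hvt) hsv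
      · rw [not_not] at hsv; rw [hsv]

lemma invA_insert (seed wd d : PySem.Dict (List Char) Int) (h : invA seed wd d) (k : List Char)
    (hk : seed.contains k = true) : invA seed wd (d.insert k (valT seed wd k)) := by
  intro k'
  rw [PySem.Dict.get?_insert]
  split
  · rename_i heq; subst heq; exact Or.inr ⟨hk, rfl⟩
  · exact h k'

lemma gvA_spec (seed wd : PySem.Dict (List Char) Int) :
    ∀ f p d, invA seed wd d → depthM seed p < f →
      (gvA wd f p d).1 = valT seed wd p ∧ invA seed wd (gvA wd f p d).2 := by
  intro f
  induction f with
  | zero => intro p d _ h; omega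
  | succ n ih =>
    intro p d hinv hdp
    simp only [gvA, gvAstep]
    cases hg : d.get? p with
    | none =>
      have hs : seed.get? p = none := by
        rcases hinv p with h1 | ⟨_, h3⟩
        · rw [← h1, hg]
        · rw [hg] at h3; cases h3
      exact ⟨(valT_none seed wd p hs).symm, hinv⟩
    | some v =>
      dsimp only
      by_cases hv : v ≠ -1
      · rw [if_pos hv]
        exact ⟨(invA_read seed wd d hinv p v hg hv).symm ▸ rfl, hinv⟩
      · rw [if_neg hv]
        rw [not_not] at hv; subst hv
        have hs : seed.get? p = some (-1) := invA_seed_neg seed wd d hinv p hg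
        have hcp : seed.contains p = true := by
          rw [PySem.Dict.contains_eq_isSome_get?, hs]; rfl
        by_cases hw : wd.contains p = true
        · rw [if_pos hw]
          refine ⟨(valT_word seed wd p hs hw).symm, ?_⟩
          have h0 : (0 : Int) = valT seed wd p := (valT_word seed wd p hs hw).symm
          rw [h0]
          exact invA_insert seed wd d hinv p hcp
        · rw [if_neg hw]
          have hw' : wd.contains p = false := by simpa using hw
          have hfold : ∀ (L : List Char) (w : Bool) (b : Int) (d₀ : PySem.Dict (List Char) Int),
              invA seed wd d₀ →
              (((L.foldl (stepA (gvA wd n) p) (w, b, d₀)).1,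
                (L.foldl (stepA (gvA wd n) p) (w, b, d₀)).2.1) =
                redA w b ((L.filter (fun a => seed.contains (p ++ [a]))).map
                  (fun a => valT seed wd (p ++ [a]))))
              ∧ invA seed wd (L.foldl (stepA (gvA wd n) p) (w, b, d₀)).2.2 := by
            intro L
            induction L with
            | nil => intro w b d₀ h; exact ⟨by simp [redA], h⟩
            | cons a L ihL =>
              intro w b d₀ h
              by_cases hc : d₀.contains (p ++ [a]) = true
              · have hcs : seed.contains (p ++ [a]) = true := by
                  rw [← invA_contains seed wd d₀ h]; exact hc
                have hdc : depthM seed (p ++ [a]) < n := by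
                  have := depth_lt seed p a hcs; omega
                obtain ⟨hr1, hr2⟩ := ih (p ++ [a]) d₀ h hdc
                simp only [List.foldl_cons, stepA, hc, if_pos, List.filter_cons, hcs,
                  List.map_cons]
                rw [hr1]
                by_cases hpar : (PySem.Int.mod (valT seed wd (p ++ [a])) 2 == 0) = true
                · cases w <;> simp only [redA, hpar, Bool.not_true] <;>
                    exact ihL _ _ _ hr2
                · have hpar' : (PySem.Int.mod (valT seed wd (p ++ [a])) 2 == 0) = false :=
                    by simpa using hpar
                  cases w <;> simp only [redA, hpar', Bool.not_false, if_true] <;>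
                    exact ihL _ _ _ hr2
              · have hcs : seed.contains (p ++ [a]) = false := by
                  rw [← invA_contains seed wd d₀ h]; simpa using hc
                simp only [List.foldl_cons, stepA, hc, List.filter_cons, hcs,
                  Bool.false_eq_true]
                exact ihL w b d₀ h
          rw [valT_reduce seed wd p hs hw']
          unfold cv
          generalize hL : pvLetters = L
          obtain ⟨hf1, hf2⟩ := hfold L false 0 d hinv
          have hval : (L.foldl (stepA (gvA wd n) p) (false, 0, d)).2.1
              = (redA false 0 ((L.filter (fun a => seed.contains (p ++ [a]))).map
                  (fun a => valT seed wd (p ++ [a])))).2 := congrArg Prod.snd hf1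
          refine ⟨hval, ?_⟩
          show invA seed wd ((L.foldl (stepA (gvA wd n) p) (false, 0, d)).2.2.insert p
              (L.foldl (stepA (gvA wd n) p) (false, 0, d)).2.1)
          have h2 : (L.foldl (stepA (gvA wd n) p) (false, 0, d)).2.1 = valT seed wd p := by
            rw [hval, valT_reduce seed wd p hs hw']
            unfold cv
            rw [hL]
          rw [h2]
          exact invA_insert seed wd _ hf2 p hcp

lemma redA_true (vs : List Int) (b : Int) :
    redA true b vs =
      (true, ((vs.filter (fun v => PySem.Int.mod v 2 == 1)).map (fun v => 1 + v)).foldl min b) := by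
  induction vs generalizing b with
  | nil => simp [redA]
  | cons v vs ih =>
    have hm : PySem.Int.mod v 2 = v % 2 := PySem.Int.mod_eq_emod_of_pos (by norm_num)
    rcases Int.emod_two_eq v with h | h <;>
      simp [redA, h, ih]

lemma redA_false (vs : List Int) (b : Int) :
    redA false b vs =
      match (vs.filter (fun v => PySem.Int.mod v 2 == 1)).map (fun v => 1 + v) with
      | [] => (false, (vs.map (fun v => 1 + v)).foldl max b)
      | w0 :: ws => (true, ws.foldl min w0) := by
  induction vs generalizing b with
  | nil => simp [redA]
  | cons v vs ih =>
    have hm : PySem.Int.mod v 2 = v % 2 := PySem.Int.mod_eq_emod_of_pos (by norm_num)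
    rcases Int.emod_two_eq v with h | h
    · simp [redA, h, ih]
    · simp [redA, h, redA_true]

lemma foldl_min_map_add (os : List Int) (b : Int) :
    (os.map (fun v => 1 + v)).foldl min (1 + b) = 1 + os.foldl min b := by
  induction os generalizing b with
  | nil => rfl
  | cons o os ih =>
    simp only [List.map_cons, List.foldl_cons]
    rw [show min (1 + b) (1 + o) = 1 + min b o by omega, ih]

lemma foldl_max_map_add (os : List Int) (b : Int) :
    (os.map (fun v => 1 + v)).foldl max (1 + b) = 1 + os.foldl max b := by
  induction os generalizing b with
  | nil => rfl
  | cons o os ih =>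
    simp only [List.map_cons, List.foldl_cons]
    rw [show max (1 + b) (1 + o) = 1 + max b o by omega, ih]

lemma foldl_max_max (a b : Int) (l : List Int) :
    l.foldl max (max a b) = max a (l.foldl max b) := by
  induction l generalizing b with
  | nil => rfl
  | cons x l ih =>
    simp only [List.foldl_cons]
    rw [max_assoc, ih]

lemma resultB (vs : List Int) :
    (if !(vs.filter (fun v => PySem.Int.mod v 2 == 1)).isEmpty
     then 1 + (PySem.List.min? (vs.filter (fun v => PySem.Int.mod v 2 == 1)) (fun y => y)).getD 0
     else if !vs.isEmpty then max 0 (1 + (PySem.List.max? vs (fun y => y)).getD 0) else 0)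
    = (redA false 0 vs).2 := by
  rw [redA_false]
  cases hodd : vs.filter (fun v => PySem.Int.mod v 2 == 1) with
  | nil =>
    simp only [List.isEmpty_nil, Bool.not_true, List.map_nil]
    cases vs with
    | nil => simp
    | cons v0 vt =>
      simp only [List.isEmpty_cons, Bool.not_false, if_true, PySem.List.max?_id_cons,
        Option.getD_some, List.map_cons, List.foldl_cons]
      rw [foldl_max_max, foldl_max_map_add]
      simp
  | cons o0 os =>
    simp only [List.isEmpty_cons, Bool.not_false, if_true, PySem.List.min?_id_cons,
      Option.getD_some, List.map_cons]
    exact (foldl_min_map_add os o0).symm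

lemma foldB_spec (seed wd : PySem.Dict (List Char) Int) :
    ∀ (rest : List (List Char)) (d : PySem.Dict (List Char) Int),
      rest.Nodup →
      rest.Pairwise (fun a b => b.length ≤ a.length) →
      (∀ k ∈ rest, seed.contains k = true) →
      (∀ k ∈ rest, d.get? k = seed.get? k) →
      (∀ k, seed.contains k = true → k ∉ rest → d.get? k = some (valT seed wd k)) →
      (∀ k, seed.contains k = false → d.get? k = none) →
      ∀ k, seed.contains k = true →
        (rest.foldl (stepKey wd) d).get? k = some (valT seed wd k) := by
  intro rest
  induction rest with
  | nil =>
    intro d _ _ _ _ h5 _ k hk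
    simpa using h5 k hk (by simp)
  | cons key tail ih =>
    intro d hnd hpw h3 h4 h5 h6 k hk
    have hck : seed.contains key = true := h3 key (by simp)
    have hgk : d.get? key = seed.get? key := h4 key (by simp)
    obtain ⟨s, hs⟩ : ∃ s, seed.get? key = some s := by
      have h := hck
      rw [PySem.Dict.contains_eq_isSome_get?] at h
      cases hx : seed.get? key with
      | none => rw [hx] at h; simp at h
      | some s => exact ⟨s, rfl⟩
    have hdk : d.get? key = some s := hgk.trans hs
    have hcont : ∀ j, d.contains j = seed.contains j := by
      intro j
      cases hj : seed.contains j with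
      | true =>
        by_cases hjr : j ∈ key :: tail
        · rw [PySem.Dict.contains_eq_isSome_get?, h4 j hjr, ← PySem.Dict.contains_eq_isSome_get?, hj]
        · rw [PySem.Dict.contains_eq_isSome_get?, h5 j hj hjr]; rfl
      | false =>
        rw [PySem.Dict.contains_eq_isSome_get?, h6 j hj]; rfl
    have hknotail : key ∉ tail := (List.nodup_cons.1 hnd).1
    have htaillen : ∀ b ∈ tail, b.length ≤ key.length := (List.pairwise_cons.1 hpw).1
    -- establish the properties of d' := stepKey wd d key, uniformly:
    -- d' agrees with d except possibly at key, where it holds some (valT key)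
    have hstep : (stepKey wd d key).get? key = some (valT seed wd key)
        ∧ ∀ j, j ≠ key → (stepKey wd d key).get? j = d.get? j := by
      unfold stepKey
      rw [hdk]
      dsimp only
      by_cases hsv : s = -1
      · subst hsv
        rw [if_pos (show ((-1 : Int) == -1) = true by decide)]
        by_cases hw : wd.contains key = true
        · rw [if_pos hw]
          refine ⟨?_, ?_⟩
          · rw [PySem.Dict.get?_insert]
            simp [valT_word seed wd key hs hw]
          · intro j hj
            rw [PySem.Dict.get?_insert, if_neg hj]
        · have hw' : wd.contains key = false := by simpa using hw
          rw [hw', if_neg (show ¬ (false = true) by decide)]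
          have hvals : (pvLetters.filter (fun a => d.contains (key ++ [a]))).map
              (fun a => (d.get? (key ++ [a])).getD 0) = cv seed wd key := by
            unfold cv
            have hfil : pvLetters.filter (fun a => d.contains (key ++ [a]))
                = pvLetters.filter (fun a => seed.contains (key ++ [a])) := by
              apply List.filter_congr
              intro a _
              exact hcont (key ++ [a])
            rw [hfil]
            apply List.map_congr_left
            intro a ha
            have hcs := (List.mem_filter.1 ha).2
            have hchild : (key ++ [a]) ∉ key :: tail := by
              intro hmem
              rcases List.mem_cons.1 hmem with he | ht
              · have := congrArg List.length he; simp at this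
              · have := htaillen _ ht; simp at this
            rw [h5 (key ++ [a]) hcs hchild]
            rfl
          rw [hvals, resultB (cv seed wd key), ← valT_reduce seed wd key hs hw']
          refine ⟨?_, ?_⟩
          · rw [PySem.Dict.get?_insert]; simp
          · intro j hj
            rw [PySem.Dict.get?_insert, if_neg hj]
      · rw [if_neg (show ¬ ((s == -1) = true) by simpa using hsv)]
        refine ⟨?_, fun _ _ => rfl⟩
        rw [hdk, valT_some_ne seed wd key s hs hsv]
    -- now apply the IH to the tail
    simp only [List.foldl_cons]
    apply ih (stepKey wd d key) (List.nodup_cons.1 hnd).2 (List.pairwise_cons.1 hpw).2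
      (fun j hj => h3 j (List.mem_cons_of_mem _ hj))
    · intro j hj
      have hjk : j ≠ key := fun he => hknotail (he ▸ hj)
      rw [hstep.2 j hjk]
      exact h4 j (List.mem_cons_of_mem _ hj)
    · intro j hj hjt
      by_cases hjk : j = key
      · subst hjk; exact hstep.1
      · rw [hstep.2 j hjk]
        exact h5 j hj (by simp [hjk, hjt])
    · intro j hj
      have hjk : j ≠ key := fun he => by rw [he, hck] at hj; cases hj
      rw [hstep.2 j hjk]
      exact h6 j hj
    · exact hk

lemma dict_keys_ofList (l : List ((List Char) × Int)) :
    (PySem.Dict.ofList l).keys = PySem.Set.ofList (l.map (·.1)) := by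
  show (l.foldl (fun d p => d.insert p.1 p.2) PySem.Dict.empty).keys = _
  rw [PySem.Dict.keys_foldl_insert_key]
  simp [PySem.Set.update_nil_left]


-- ===== VERDICT (by name: the statement is the Claim_ definition above) =====
theorem game_value_spec : Claim_equal_game_value := by
  intro prefix_ prefix_dict word_dict _ hpre
  unfold Pre_game_value at hpre
  unfold Spec_game_value game_value game_value_alt
  dsimp only
  set pd := PySem.Dict.ofList (prefix_dict.map (fun q => (q.1.toList, q.2))) with hpd
  set wd := PySem.Dict.ofList (word_dict.map (fun q => (q.1.toList, q.2))) with hwd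
  have hkeys : pd.keys = PySem.Set.ofList ((prefix_dict.map (fun q => (q.1.toList, q.2))).map (·.1)) :=
    dict_keys_ofList _
  have hcp : pd.contains prefix_.toList = true := by
    rw [PySem.Dict.contains_iff_mem_keys, hkeys, PySem.Set.mem_ofList]
    simpa [List.map_map, Function.comp] using hpre
  -- A side
  have hdepth : depthM pd prefix_.toList < prefix_dict.length + 1 := by
    unfold depthM
    have h1 := List.length_filter_le (fun k => decide (prefix_.toList.length < k.length)) pd.keys
    have h2 : pd.keys.length ≤ prefix_dict.length := by
      rw [hkeys]
      calc (PySem.Set.ofList _).length ≤ _ := PySem.Set.length_ofList_le _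
        _ = prefix_dict.length := by simp
    omega
  have hA := (gvA_spec pd wd (prefix_dict.length + 1) prefix_.toList pd
      (fun k => Or.inl rfl) hdepth).1
  rw [hA]
  -- B side
  have hnk : pd.keys.Nodup := PySem.Dict.nodup_keys_ofList _
  set ks := PySem.List.sorted pd.keys (fun k => k.length) true with hks
  have hperm : ks.Perm pd.keys := PySem.List.sorted_perm pd.keys (fun k => k.length) true
  have hB := foldB_spec pd wd ks pd
      (hperm.nodup_iff.2 hnk)
      (PySem.List.sorted_pairwise_rev pd.keys (fun k => k.length))
      (fun k hkk => (PySem.Dict.contains_iff_mem_keys pd k).2 (hperm.mem_iff.1 hkk))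
      (fun _ _ => rfl)
      (fun k hkc hkn => absurd (hperm.mem_iff.2 ((PySem.Dict.contains_iff_mem_keys pd k).1 hkc)) hkn)
      (fun k hkc => by
        rw [PySem.Dict.contains_eq_isSome_get?] at hkc
        cases hx : pd.get? k with
        | none => rfl
        | some v => rw [hx] at hkc; simp at hkc)
      prefix_.toList hcp
  rw [hB]
  rfl
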